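-- pv_equiv track=rewrite | github.com/Scientific-Computing-Lab-NRCN/OMPify | database_creator/parsers/HPCorpus_parser/parse_tools.py | count_newlines
-- ===== SOURCE A (Python) =====
-- def count_newlines(code):
--     counter = 0
--
--     for letter in code:
--         if letter == '\n':
--             counter += 1
--             continue
--
--         return counter
--
--     return counter
-- ===== SOURCE B (Python) =====
-- def count_newlines(code):
--     return len(code) - len(code.lstrip('\n'))
-- ===== Notes on version B (the rewrite author's own statement) =====
-- stated objective: simpler
-- what changed: Replaces the explicit early-return counting loop with a loop-free length difference against the builtin left-strip of newline characters.
import Mathlib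
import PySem

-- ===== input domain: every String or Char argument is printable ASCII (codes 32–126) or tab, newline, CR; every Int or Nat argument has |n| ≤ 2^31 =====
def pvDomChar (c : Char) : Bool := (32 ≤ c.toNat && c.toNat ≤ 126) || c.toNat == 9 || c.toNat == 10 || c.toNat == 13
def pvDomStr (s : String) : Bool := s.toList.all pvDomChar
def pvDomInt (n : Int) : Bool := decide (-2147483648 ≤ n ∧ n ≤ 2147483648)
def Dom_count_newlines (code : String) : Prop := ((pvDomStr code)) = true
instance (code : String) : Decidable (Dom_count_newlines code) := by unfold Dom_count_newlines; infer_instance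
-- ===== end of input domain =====

-- B replaces A's explicit early-return counting loop with len(code) - len(code.lstrip('\n')) (objective: simpler).

-- ===== PORT A =====
-- the loop: count leading '\n', return the counter at the first other character
def countNewlinesLoop : List Char → Int → Int
  | [], counter => counter
  | letter :: rest, counter =>
      if letter = '\n' then countNewlinesLoop rest (counter + 1)
      else counter

def count_newlines (code : String) : Int :=
  countNewlinesLoop code.toList 0

-- ===== PORT B =====
-- code.lstrip('\n') ported by hand as dropWhile (· = '\n') (exact: lstrip with a
-- one-character chars argument removes exactly the leading run of that character)
def count_newlines_alt (code : String) : Int :=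
  (code.toList.length : Int) - ((code.toList.dropWhile (· = '\n')).length : Int)

-- ===== PRECONDITION & SPEC =====
def Spec_count_newlines (code : String) (out : Int) : Prop := out = count_newlines_alt code
instance (code : String) (out : Int) : Decidable (Spec_count_newlines code out) := by unfold Spec_count_newlines; infer_instance

-- ===== CLAIM (what is proved, stated in full; the proofs are below) =====
def Claim_equal_count_newlines : Prop := ∀ (code : String), Dom_count_newlines code → Spec_count_newlines code (count_newlines code)

-- ===== LEMMAS AND PROOFS =====
theorem countNewlinesLoop_eq (l : List Char) (c : Int) :
    countNewlinesLoop l c = c + (l.length : Int) - ((l.dropWhile (· = '\n')).length : Int) := by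
  induction l generalizing c with
  | nil => simp [countNewlinesLoop]
  | cons h t ih =>
      by_cases hh : h = '\n'
      · simp [countNewlinesLoop, hh, List.dropWhile, ih]; ring
      · simp [countNewlinesLoop, hh, List.dropWhile]

-- ===== VERDICT (by name: the statement is the Claim_ definition above) =====
theorem count_newlines_spec : Claim_equal_count_newlines := by
  intro code _
  unfold Spec_count_newlines count_newlines count_newlines_alt
  rw [countNewlinesLoop_eq]
  ring
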